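-- pv_equiv track=rewrite | github.com/AnimeLore/kpolyakov-practice | 57/C.py | chnR
-- ===== SOURCE A (Python) =====
-- romans = 'IVXLCDM'
--
-- values = [1, 5, 10, 50, 100, 500, 1000]
--
-- def rmn2arb(s):
--     n, prev = 0, 100
--     for c in s:
--         pos = romans.index(c)
--         if pos > prev:
--             n -= 2 * values[prev]
--         n += values[pos]
--         prev = pos
--     return str(n)
--
-- def chnR(s):
--     w = s.split()
--     o = False
--     for i in range(len(w)):
--         for j in w[i]:
--             if romans.find(j) == -1:
--                 o = True
--                 break
--         if o:
--             o = False
--             continue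
--         else:
--             w[i] = rmn2arb(w[i])
--     return " ".join(w)
-- ===== SOURCE B (Python) =====
-- ROMAN = {'I': 1, 'V': 5, 'X': 10, 'L': 50, 'C': 100, 'D': 500, 'M': 1000}
--
-- def rmn2arb(s):
--     vals = [ROMAN[c] for c in s]
--     total = 0
--     for v, nxt in zip(vals, vals[1:] + [0]):
--         total += v if v >= nxt else -v
--     return str(total)
--
-- def chnR(s):
--     return " ".join(rmn2arb(w) if all(c in ROMAN for c in w) else w
--                     for w in s.split())
-- ===== Notes on version B (the rewrite author's own statement) =====
-- stated objective: alternative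
-- what changed: Roman conversion is rewritten from A's lookback scheme (add each value, then retro-correct with -2*values[prev] when the previous symbol was smaller) to a lookahead single pass that pairs each value with its successor via zip and adds or subtracts it outright, and A's per-word flag/break non-Roman scan becomes an all-membership check against a value dict.
import Mathlib
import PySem

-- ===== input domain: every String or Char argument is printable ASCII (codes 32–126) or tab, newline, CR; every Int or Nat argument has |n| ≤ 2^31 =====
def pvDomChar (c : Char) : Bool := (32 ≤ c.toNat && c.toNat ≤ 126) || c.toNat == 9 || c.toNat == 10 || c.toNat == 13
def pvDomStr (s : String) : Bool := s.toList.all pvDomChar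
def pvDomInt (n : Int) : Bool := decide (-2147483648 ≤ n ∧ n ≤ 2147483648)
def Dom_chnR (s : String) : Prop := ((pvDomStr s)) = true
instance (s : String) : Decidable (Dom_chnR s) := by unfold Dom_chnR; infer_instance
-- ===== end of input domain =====

-- B replaces A's lookback-with-correction Roman conversion by a lookahead sum over the value
-- list (add a value iff it is ≥ its successor) and A's flag/break word scan by an all-membership
-- check against a value dict; objective: alternative (same cost, different decomposition).

-- ===== PORT A =====
def romansA : List Char := ['I', 'V', 'X', 'L', 'C', 'D', 'M']

def valuesA : List Int := [1, 5, 10, 50, 100, 500, 1000]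

-- romans.index(c) raises on absent c; chnR only calls rmn2arb on all-roman words, so the
-- `.getD 0` fallback is unreachable there (same for values[prev]: prev ∈ {100} ∪ [0,6]).
def rmn2arb (s : String) : String :=
  let r := s.toList.foldl (fun (st : Int × Int) c =>
    let pos : Int := ((PySem.List.index? romansA c).getD 0 : Nat)
    let n := if pos > st.2 then st.1 - 2 * PySem.List.pyGetD valuesA st.2 0 else st.1
    (n + PySem.List.pyGetD valuesA pos 0, pos)) ((0 : Int), (100 : Int))
  PySem.Int.toStr r.1

-- A's inner loop over the word's chars with `break` on the first char with romans.find(j) == -1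
def scanNonRoman : List Char → Bool
  | [] => false
  | j :: rest =>
      if PySem.Str.find "IVXLCDM" (String.singleton j) == -1 then true else scanNonRoman rest

def chnR (s : String) : String :=
  let w := PySem.Str.split₀ s
  let w := w.map (fun wi => if scanNonRoman wi.toList then wi else rmn2arb wi)
  PySem.Str.join " " w

-- ===== PORT B =====
def romanDict : PySem.Dict Char Int :=
  PySem.Dict.ofList [('I', 1), ('V', 5), ('X', 10), ('L', 50), ('C', 100), ('D', 500), ('M', 1000)]

-- ROMAN[c] raises on absent c; only reached on all-roman words, so `.getD 0` is unreachable.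
def rmn2arbAlt (s : String) : String :=
  let vals : List Int := s.toList.map (fun c => (PySem.Dict.get? romanDict c).getD 0)
  let total := (vals.zip (vals.drop 1 ++ [0])).foldl
    (fun (t : Int) (p : Int × Int) => t + (if p.1 ≥ p.2 then p.1 else -p.1)) 0
  PySem.Int.toStr total

def chnR_alt (s : String) : String :=
  PySem.Str.join " " ((PySem.Str.split₀ s).map (fun w =>
    if w.toList.all (fun c => (PySem.Dict.get? romanDict c).isSome) then rmn2arbAlt w else w))

-- ===== PRECONDITION & SPEC =====
def Spec_chnR (s : String) (out : String) : Prop := out = chnR_alt s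
instance (s : String) (out : String) : Decidable (Spec_chnR s out) := by unfold Spec_chnR; infer_instance

-- ===== CLAIM (what is proved, stated in full; the proofs are below) =====
def Claim_equal_chnR : Prop := ∀ (s : String), Dom_chnR s → Spec_chnR s (chnR s)

-- ===== LEMMAS AND PROOFS =====

lemma romanDict_mk : romanDict
    = PySem.Dict.mk [('I', 1), ('V', 5), ('X', 10), ('L', 50), ('C', 100), ('D', 500), ('M', 1000)] := by
  decide

-- per-char: A's roman test (find == -1) is the negation of B's (dict lookup succeeds)
lemma scan_char_eq (c : Char) :
    (PySem.Str.find "IVXLCDM" (String.singleton c) == -1)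
      = !(PySem.Dict.get? romanDict c).isSome := by
  by_cases hm : c ∈ ['I', 'V', 'X', 'L', 'C', 'D', 'M']
  · simp only [List.mem_cons, List.not_mem_nil, or_false] at hm
    rcases hm with h|h|h|h|h|h|h <;> subst h <;> decide
  · have hf : PySem.Chars.find ['I', 'V', 'X', 'L', 'C', 'D', 'M'] [c] = -1 :=
      (PySem.Chars.find_eq_neg_one_iff _ _).mpr
        (fun hinf => hm (by simpa using hinf.sublist.subset (List.mem_singleton_self c)))
    simp only [List.mem_cons, List.not_mem_nil, or_false, not_or] at hm
    obtain ⟨h1,h2,h3,h4,h5,h6,h7⟩ := hm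
    simp [PySem.Str.find_eq, hf, romanDict_mk, Ne.symm h1, Ne.symm h2, Ne.symm h3,
      Ne.symm h4, Ne.symm h5, Ne.symm h6, Ne.symm h7, PySem.Dict.get?]

-- A's flag/break scan is the negation of B's `all` membership check
lemma scan_eq_not_all (cs : List Char) :
    scanNonRoman cs = !(cs.all (fun c => (PySem.Dict.get? romanDict c).isSome)) := by
  induction cs with
  | nil => simp [scanNonRoman]
  | cons c rest ih =>
      simp only [scanNonRoman, List.all_cons, Bool.not_and]
      rw [scan_char_eq]
      cases h : (PySem.Dict.get? romanDict c).isSome <;> simp [ih]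

-- proof-side abbreviations for the two loop bodies
def valP (p : Int) : Int := PySem.List.pyGetD valuesA p 0
def valB (c : Char) : Int := (PySem.Dict.get? romanDict c).getD 0
def posOf (c : Char) : Int := ((PySem.List.index? romansA c).getD 0 : Nat)
def fA (st : Int × Int) (c : Char) : Int × Int :=
  let pos : Int := ((PySem.List.index? romansA c).getD 0 : Nat)
  let n := if pos > st.2 then st.1 - 2 * PySem.List.pyGetD valuesA st.2 0 else st.1
  (n + PySem.List.pyGetD valuesA pos 0, pos)
def laF (t : Int) (p : Int × Int) : Int := t + (if p.1 ≥ p.2 then p.1 else -p.1)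
def laSum (vs : List Int) : Int := (vs.zip (vs.drop 1 ++ [0])).foldl laF 0

lemma rmn2arb_eq (s : String) :
    rmn2arb s = PySem.Int.toStr ((s.toList.foldl fA ((0 : Int), (100 : Int))).1) := rfl

lemma rmn2arbAlt_eq (s : String) :
    rmn2arbAlt s = PySem.Int.toStr (laSum (s.toList.map valB)) := rfl

lemma pos_mem (c : Char) (h : (PySem.Dict.get? romanDict c).isSome = true) :
    c = 'I' ∨ c = 'V' ∨ c = 'X' ∨ c = 'L' ∨ c = 'C' ∨ c = 'D' ∨ c = 'M' := by
  by_contra hm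
  simp only [not_or] at hm
  obtain ⟨h1,h2,h3,h4,h5,h6,h7⟩ := hm
  simp [romanDict_mk, PySem.Dict.get?, Ne.symm h1, Ne.symm h2, Ne.symm h3, Ne.symm h4,
    Ne.symm h5, Ne.symm h6, Ne.symm h7] at h

lemma valB_eq (c : Char) (h : (PySem.Dict.get? romanDict c).isSome = true) :
    valB c = valP (posOf c) := by
  rcases pos_mem c h with h|h|h|h|h|h|h <;> subst h <;> decide

lemma posOf_bounds (c : Char) (h : (PySem.Dict.get? romanDict c).isSome = true) :
    0 ≤ posOf c ∧ posOf c ≤ 6 := by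
  rcases pos_mem c h with h|h|h|h|h|h|h <;> subst h <;> decide

lemma zip_cons (v : Int) (rest : List Int) :
    (v :: rest).zip ((v :: rest).drop 1 ++ [0])
      = (v, rest.headI) :: rest.zip (rest.drop 1 ++ [0]) := by
  cases rest <;> simp

lemma laF_shift (l : List (Int × Int)) (t : Int) : l.foldl laF t = t + l.foldl laF 0 := by
  induction l generalizing t with
  | nil => simp
  | cons p l ih =>
      simp only [List.foldl_cons, laF, Int.zero_add]
      rw [ih, ih (if p.1 ≥ p.2 then p.1 else -p.1)]
      ring

lemma laSum_cons (v : Int) (rest : List Int) :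
    laSum (v :: rest) = (if v ≥ rest.headI then v else -v) + laSum rest := by
  unfold laSum
  rw [zip_cons, List.foldl_cons, laF_shift]
  simp [laF]

lemma aux_cmp (p q : Int) (hp0 : 0 ≤ p) (hp6 : p ≤ 6) (hq0 : 0 ≤ q) (hq6 : q ≤ 6) :
    (if p > q then valP q - 2 * valP q else valP q)
      = (if valP q ≥ valP p then valP q else -valP q) := by
  interval_cases p <;> interval_cases q <;> decide

lemma valP_pos (q : Int) (hq0 : 0 ≤ q) (hq6 : q ≤ 6) : 0 < valP q := by
  interval_cases q <;> decide

-- the loop invariant: A's lookback fold from (n, q) agrees with B's lookahead sum led by valP q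
lemma mainL (cs : List Char) (h : ∀ c ∈ cs, (PySem.Dict.get? romanDict c).isSome = true)
    (q : Int) (hq0 : 0 ≤ q) (hq6 : q ≤ 6) (n : Int) :
    (cs.foldl fA (n, q)).1 + valP q = n + laSum (valP q :: cs.map valB) := by
  induction cs generalizing q n with
  | nil =>
      have hpos := valP_pos q hq0 hq6
      simp only [List.foldl_nil, List.map_nil, laSum, List.drop, List.nil_append,
        List.zip_cons_cons, List.zip_nil_left, List.foldl_cons, List.foldl_nil, laF]
      rw [if_pos (by omega : valP q ≥ 0)]
      ring
  | cons c rest ih =>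
      have hc := h c (by simp)
      have hrest : ∀ x ∈ rest, (PySem.Dict.get? romanDict x).isSome = true :=
        fun x hx => h x (by simp [hx])
      obtain ⟨hp0, hp6⟩ := posOf_bounds c hc
      rw [List.foldl_cons]
      have hfA : fA (n, q) c
          = ((if posOf c > q then n - 2 * valP q else n) + valP (posOf c), posOf c) := rfl
      rw [hfA]
      have ih' := ih hrest (posOf c) hp0 hp6
        ((if posOf c > q then n - 2 * valP q else n) + valP (posOf c))
      rw [laSum_cons (valP (posOf c))] at ih'
      rw [List.map_cons, laSum_cons (valP q), valB_eq c hc, laSum_cons (valP (posOf c))]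
      simp only [List.headI_cons]
      have key := aux_cmp (posOf c) q hp0 hp6 hq0 hq6
      split_ifs at key ih' ⊢ <;> omega

lemma word_eq (w : String)
    (h : w.toList.all (fun c => (PySem.Dict.get? romanDict c).isSome) = true) :
    rmn2arb w = rmn2arbAlt w := by
  rw [rmn2arb_eq, rmn2arbAlt_eq]
  congr 1
  have h' : ∀ c ∈ w.toList, (PySem.Dict.get? romanDict c).isSome = true := by
    simpa [List.all_eq_true] using h
  generalize hcs : w.toList = cs at h'
  cases cs with
  | nil => simp [laSum]
  | cons c rest =>
      have hc := h' c (by simp)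
      have hrest : ∀ x ∈ rest, (PySem.Dict.get? romanDict x).isSome = true :=
        fun x hx => h' x (by simp [hx])
      obtain ⟨hp0, hp6⟩ := posOf_bounds c hc
      rw [List.foldl_cons]
      have hfA0 : fA ((0 : Int), (100 : Int)) c
          = ((if posOf c > 100 then 0 - 2 * PySem.List.pyGetD valuesA 100 0 else 0)
              + valP (posOf c), posOf c) := rfl
      rw [hfA0, if_neg (by omega : ¬ posOf c > 100)]
      have hm := mainL rest hrest (posOf c) hp0 hp6 (0 + valP (posOf c))
      rw [List.map_cons, valB_eq c hc]
      omega

-- ===== VERDICT (by name: the statement is the Claim_ definition above) =====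
theorem chnR_spec : Claim_equal_chnR := by
  intro s _
  unfold Spec_chnR
  simp only [chnR, chnR_alt]
  congr 1
  apply List.map_congr_left
  intro w _
  rw [scan_eq_not_all]
  cases h : (w.toList.all (fun c => (PySem.Dict.get? romanDict c).isSome)) with
  | false => simp
  | true => simpa using word_eq w h
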